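-- pv_equiv track=rewrite | github.com/sathvikloke/tp53-sgrna-prioritization | src/fetch_cds.py | parse_fasta_to_cds
-- ===== SOURCE A (Python) =====
-- def parse_fasta_to_cds(fasta_text: str) -> str:
--     """Return the concatenated bases of the first FASTA record."""
--     bases = []
--     seen_header = False
--     for line in fasta_text.splitlines():
--         if not line:
--             continue
--         if line.startswith(">"):
--             if seen_header:
--                 # Stop at the second record (we only want the first CDS).
--                 break
--             seen_header = True
--             continue
--         bases.append(line.strip().upper())
--     cds = "".join(bases)
--     if not cds:
--         raise ValueError("Empty CDS extracted from FASTA response.")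
--     return cds
-- ===== SOURCE B (Python) =====
-- def parse_fasta_to_cds(fasta_text: str) -> str:
--     """Return the concatenated bases of the first FASTA record."""
--     lines = fasta_text.splitlines()
--     headers = [i for i, l in enumerate(lines) if l.startswith(">")]
--     end = headers[1] if len(headers) >= 2 else len(lines)
--     skip = headers[0] if headers else -1
--     cds = "".join(l.strip().upper()
--                   for i, l in enumerate(lines[:end]) if l and i != skip)
--     if not cds:
--         raise ValueError("Empty CDS extracted from FASTA response.")
--     return cds
-- ===== Notes on version B (the rewrite author's own statement) =====
-- stated objective: alternative
-- what changed: Replaces the streaming seen_header/break loop with a precomputed table of header-line indices, from which the first-record boundary and the header to skip are derived, and a second boundary-sliced comprehension pass collects the bases; Pre_ excludes only the inputs where both programs raise ValueError (first record contributes no bases).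
import Mathlib
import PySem

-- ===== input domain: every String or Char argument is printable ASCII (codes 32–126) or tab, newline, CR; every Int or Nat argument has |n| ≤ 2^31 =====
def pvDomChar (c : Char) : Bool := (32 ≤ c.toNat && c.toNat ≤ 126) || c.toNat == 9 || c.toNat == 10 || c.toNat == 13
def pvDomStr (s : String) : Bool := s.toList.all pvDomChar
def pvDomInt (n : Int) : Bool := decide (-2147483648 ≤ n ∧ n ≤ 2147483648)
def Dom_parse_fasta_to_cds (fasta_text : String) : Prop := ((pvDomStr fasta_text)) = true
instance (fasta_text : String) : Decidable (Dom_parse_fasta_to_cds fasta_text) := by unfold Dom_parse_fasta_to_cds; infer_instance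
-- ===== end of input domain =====

-- B replaces A's streaming seen_header/break loop by a precomputed header-index table
-- plus a boundary-sliced second pass (alternative decomposition, same cost).

-- ===== PORT A =====
-- the for-loop of A: state = (accumulated bases, seen_header); 'break' returns the accumulator
def pvGoA (ls : List String) (acc : List String) (seen : Bool) : List String :=
  match ls with
  | [] => acc
  | l :: rest =>
    if l = "" then pvGoA rest acc seen
    else if PySem.Str.startswith l ">" then
      (if seen then acc else pvGoA rest acc true)
    else pvGoA rest (acc ++ [PySem.Str.upper (PySem.Str.strip l)]) seen

-- raises ValueError when the joined result is empty: those inputs are outside Pre_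
def parse_fasta_to_cds (fasta_text : String) : String :=
  PySem.Str.join "" (pvGoA (PySem.Str.splitlines fasta_text) [] false)

-- ===== PORT B =====
def parse_fasta_to_cds_alt (fasta_text : String) : String :=
  let lines := PySem.Str.splitlines fasta_text
  let headers := ((PySem.List.enumerate lines 0).filter
      (fun p => PySem.Str.startswith p.2 ">")).map (fun p => p.1)
  let endI : Int := if 2 ≤ headers.length then headers.getD 1 0 else (lines.length : Int)
  let skip : Int := if headers.isEmpty then -1 else headers.getD 0 0
  let body := (PySem.List.enumerate (PySem.List.slice lines none (some endI)) 0).filter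
      (fun p => p.2 != "" && p.1 != skip)
  -- raises ValueError when the joined result is empty: those inputs are outside Pre_
  PySem.Str.join "" (body.map (fun p => PySem.Str.upper (PySem.Str.strip p.2)))

-- ===== PRECONDITION & SPEC =====
-- Pre_ excludes exactly the inputs on which Python A raises ValueError: no line of the
-- first record (at most one header strictly before it, itself not a header) has a
-- non-whitespace character; Python B raises the same ValueError there.
def Pre_parse_fasta_to_cds (fasta_text : String) : Prop :=
  (let lines := PySem.Str.splitlines fasta_text
   (List.range lines.length).any (fun i =>
     decide ((lines.take i).countP (fun l => PySem.Str.startswith l ">") ≤ 1)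
     && !(PySem.Str.startswith (lines.getD i "") ">")
     && (PySem.Str.strip (lines.getD i "") != ""))) = true
instance (fasta_text : String) : Decidable (Pre_parse_fasta_to_cds fasta_text) := by
  unfold Pre_parse_fasta_to_cds; infer_instance

def pvWitness_parse_fasta_to_cds : String := ">seq1\nacg t\nTT\n>seq2\nAAAA"

def Spec_parse_fasta_to_cds (fasta_text : String) (out : String) : Prop :=
  out = parse_fasta_to_cds_alt fasta_text
instance (fasta_text : String) (out : String) : Decidable (Spec_parse_fasta_to_cds fasta_text out) := by
  unfold Spec_parse_fasta_to_cds; infer_instance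

-- ===== CLAIM (what is proved, stated in full; the proofs are below) =====
def Claim_equal_parse_fasta_to_cds : Prop := ∀ (fasta_text : String), Dom_parse_fasta_to_cds fasta_text → Pre_parse_fasta_to_cds fasta_text → Spec_parse_fasta_to_cds fasta_text (parse_fasta_to_cds fasta_text)

-- ===== LEMMAS AND PROOFS =====

-- abbreviations used only by the proofs
def pvH (l : String) : Bool := PySem.Str.startswith l ">"
def pvF (l : String) : String := PySem.Str.upper (PySem.Str.strip l)

theorem pvH_empty : pvH "" = false := by decide

theorem pvGoA_acc (ls : List String) (acc : List String) (seen : Bool) :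
    pvGoA ls acc seen = acc ++ pvGoA ls [] seen := by
  induction ls generalizing acc seen with
  | nil => simp [pvGoA]
  | cons l rest ih =>
    simp only [pvGoA]
    split_ifs with h1 h2 h3
    · exact ih acc seen
    · simp
    · rw [ih acc true]
    · rw [ih (acc ++ [PySem.Str.upper (PySem.Str.strip l)]) seen,
          ih ([] ++ [PySem.Str.upper (PySem.Str.strip l)]) seen]
      simp

theorem pvH_eq (l : String) : PySem.Str.startswith l ">" = pvH l := rfl

theorem pvGoA_true (ls : List String) :
    pvGoA ls [] true = ((ls.takeWhile (fun l => !pvH l)).filter (fun l => l != "")).map pvF := by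
  induction ls with
  | nil => simp [pvGoA]
  | cons l rest ih =>
    simp only [pvGoA, pvH_eq]
    by_cases hl : l = ""
    · subst hl
      simp [pvH_empty, ih]
    · rw [if_neg hl]
      by_cases hH : pvH l = true
      · simp [hH]
      · have hH' : pvH l = false := by simpa using hH
        simp only [hH', Bool.false_eq_true, if_false]
        rw [pvGoA_acc, ih]
        simp [List.takeWhile_cons, hH', hl, pvF]

theorem pvGoA_noheader (ls : List String) (h : ∀ l ∈ ls, pvH l = false) :
    pvGoA ls [] false = (ls.filter (fun l => l != "")).map pvF := by
  induction ls with
  | nil => simp [pvGoA]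
  | cons l rest ih =>
    have hH' : pvH l = false := h l (by simp)
    have ih' := ih (fun x hx => h x (by simp [hx]))
    simp only [pvGoA, pvH_eq]
    by_cases hl : l = ""
    · subst hl; simp [ih']
    · rw [if_neg hl]
      simp only [hH', Bool.false_eq_true, if_false]
      rw [pvGoA_acc, ih']
      simp [hl, pvF]

theorem pvGoA_split (pre : List String) (h0 : String) (rest : List String)
    (hpre : ∀ l ∈ pre, pvH l = false) (hh : pvH h0 = true) :
    pvGoA (pre ++ h0 :: rest) [] false
      = (pre.filter (fun l => l != "")).map pvF ++ pvGoA rest [] true := by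
  have hne : h0 ≠ "" := by
    intro h; rw [h, pvH_empty] at hh; exact Bool.false_ne_true hh
  induction pre with
  | nil =>
    simp only [List.nil_append, pvGoA, pvH_eq]
    rw [if_neg hne]
    simp only [hh, if_true]
    simp
  | cons l pre' ih =>
    have hH' : pvH l = false := hpre l (by simp)
    have ih' := ih (fun x hx => hpre x (by simp [hx]))
    simp only [List.cons_append, pvGoA, pvH_eq]
    by_cases hl : l = ""
    · subst hl; simpa [List.filter_cons] using ih'
    · rw [if_neg hl]
      simp only [hH', Bool.false_eq_true, if_false]
      rw [pvGoA_acc, ih']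
      simp [hl, pvF]

-- headers of a header-free list are empty
theorem pvEnumH_nil (ls : List String) (s : Int) (h : ∀ l ∈ ls, pvH l = false) :
    (PySem.List.enumerate ls s).filter (fun p => PySem.Str.startswith p.2 ">") = [] := by
  induction ls generalizing s with
  | nil => simp [PySem.List.enumerate_nil]
  | cons l rest ih =>
    rw [PySem.List.enumerate_cons, List.filter_cons]
    simp only [pvH_eq, h l (by simp), Bool.false_eq_true, if_false]
    exact ih (s + 1) (fun x hx => h x (by simp [hx]))

theorem pvEnumH_split (pre : List String) (h0 : String) (rest : List String) (s : Int)
    (hpre : ∀ l ∈ pre, pvH l = false) (hh : pvH h0 = true) :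
    (PySem.List.enumerate (pre ++ h0 :: rest) s).filter (fun p => PySem.Str.startswith p.2 ">")
      = (s + pre.length, h0) ::
        (PySem.List.enumerate rest (s + pre.length + 1)).filter (fun p => PySem.Str.startswith p.2 ">") := by
  rw [PySem.List.enumerate_append, List.filter_append,
      pvEnumH_nil pre s hpre, List.nil_append, PySem.List.enumerate_cons, List.filter_cons]
  simp only [pvH_eq, hh, if_true]

-- the body pass when the skip index misses every index of the segment
theorem pvBody_noskip (ls : List String) (s skip : Int)
    (h : ∀ k : Nat, k < ls.length → s + (k : Int) ≠ skip) :
    ((PySem.List.enumerate ls s).filter (fun p => p.2 != "" && p.1 != skip)).map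
        (fun p => PySem.Str.upper (PySem.Str.strip p.2))
      = (ls.filter (fun l => l != "")).map pvF := by
  induction ls generalizing s with
  | nil => simp [PySem.List.enumerate_nil]
  | cons l rest ih =>
    rw [PySem.List.enumerate_cons, List.filter_cons]
    have hs : (s != skip) = true := by
      have := h 0 (by simp)
      simpa using this
    have ih' := ih (s + 1) (fun k hk => by
      have := h (k + 1) (by simpa using Nat.succ_lt_succ hk)
      push_cast at this ⊢
      omega)
    by_cases hl : l = ""
    · subst hl
      simp only [List.filter_cons]
      simpa using ih'
    · have hl' : (l != "") = true := by simpa using hl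
      simp only [hl', hs, Bool.and_self, if_true, List.map_cons, List.filter_cons]
      rw [ih']
      simp [hl, pvF]

-- the body pass over pre ++ h0 :: rest with skip = index of h0
theorem pvBody_skip (pre : List String) (h0 : String) (rest : List String) :
    ((PySem.List.enumerate (pre ++ h0 :: rest) 0).filter
        (fun p => p.2 != "" && p.1 != (pre.length : Int))).map
        (fun p => PySem.Str.upper (PySem.Str.strip p.2))
      = (pre.filter (fun l => l != "")).map pvF ++ (rest.filter (fun l => l != "")).map pvF := by
  rw [PySem.List.enumerate_append, List.filter_append, List.map_append,
      PySem.List.enumerate_cons, List.filter_cons]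
  have h1 : ((PySem.List.enumerate pre 0).filter (fun p => p.2 != "" && p.1 != (pre.length : Int))).map
      (fun p => PySem.Str.upper (PySem.Str.strip p.2)) = (pre.filter (fun l => l != "")).map pvF :=
    pvBody_noskip pre 0 (pre.length : Int) (fun k hk => by
      have : (k : Int) < (pre.length : Int) := by exact_mod_cast hk
      omega)
  have hmid : ((0 : Int) + (pre.length : Int) != (pre.length : Int)) = false := by simp
  have h2 := pvBody_noskip rest ((0 : Int) + (pre.length : Int) + 1) (pre.length : Int)
      (fun k hk => by omega)
  rw [h1]
  simp only [hmid, Bool.and_false, Bool.false_eq_true, if_false]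
  rw [h2]

theorem pvDropHead {T : Type} (q : T → Bool) (ls : List T) (x : T) (t : List T)
    (h : ls.dropWhile q = x :: t) : q x = false := by
  induction ls with
  | nil => simp at h
  | cons a as ih =>
    rw [List.dropWhile_cons] at h
    split at h
    · exact ih h
    · cases h
      exact Bool.eq_false_iff.mpr ‹¬ _›

theorem pvTakeApp {T : Type} (xs ys : List T) (n : Nat) :
    (xs ++ ys).take (xs.length + n) = xs ++ ys.take n := by
  induction xs with
  | nil => simp
  | cons a as ih =>
    simp only [List.cons_append, List.length_cons, Nat.succ_add, List.take_succ_cons, ih]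

theorem pvTakeAll {T : Type} (q : T → Bool) (ls : List T) (h : ∀ l ∈ ls, q l = true) :
    ls.takeWhile q = ls := by
  induction ls with
  | nil => rfl
  | cons a as ih =>
    rw [List.takeWhile_cons, if_pos (h a (by simp))]
    rw [ih (fun x hx => h x (by simp [hx]))]

theorem pvTakeMid {T : Type} (q : T → Bool) (mid : List T) (y : T) (t : List T)
    (hmid : ∀ l ∈ mid, q l = true) (hy : q y = false) :
    (mid ++ y :: t).takeWhile q = mid := by
  induction mid with
  | nil => simp [hy]
  | cons a as ih =>
    rw [List.cons_append, List.takeWhile_cons, if_pos (hmid a (by simp))]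
    rw [ih (fun x hx => hmid x (by simp [hx]))]

theorem pvSplitList (ls : List String) :
    ∃ pre r, ls = pre ++ r ∧ (∀ l ∈ pre, pvH l = false) ∧
      (r = [] ∨ ∃ h0 t, r = h0 :: t ∧ pvH h0 = true) := by
  refine ⟨ls.takeWhile (fun l => !pvH l), ls.dropWhile (fun l => !pvH l),
    (List.takeWhile_append_dropWhile).symm, ?_, ?_⟩
  · intro l hl
    simpa using List.mem_takeWhile_imp hl
  · cases hd : ls.dropWhile (fun l => !pvH l) with
    | nil => exact Or.inl rfl
    | cons h0 t => exact Or.inr ⟨h0, t, rfl, by simpa using pvDropHead _ ls h0 t hd⟩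

theorem pvMain (ls : List String) :
    pvGoA ls [] false
      = (let headers := ((PySem.List.enumerate ls 0).filter
            (fun p => PySem.Str.startswith p.2 ">")).map (fun p => p.1)
         let endI : Int := if 2 ≤ headers.length then headers.getD 1 0 else (ls.length : Int)
         let skip : Int := if headers.isEmpty then -1 else headers.getD 0 0
         ((PySem.List.enumerate (PySem.List.slice ls none (some endI)) 0).filter
            (fun p => p.2 != "" && p.1 != skip)).map
            (fun p => PySem.Str.upper (PySem.Str.strip p.2))) := by
  simp only []
  obtain ⟨pre, r, hls, hpreH, hr⟩ := pvSplitList ls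
  subst hls
  rcases hr with rfl | ⟨h0, rest, rfl, hh⟩
  · -- no header at all
    simp only [List.append_nil]
    rw [pvEnumH_nil pre 0 hpreH]
    simp only [List.map_nil, List.length_nil, List.isEmpty_nil, if_true,
      show ¬ (2 ≤ 0) by omega, if_false]
    rw [PySem.List.slice_to_natCast]
    rw [List.take_length]
    rw [pvGoA_noheader pre hpreH,
        pvBody_noskip pre 0 (-1) (fun k hk => by omega)]
  · obtain ⟨mid, r2, hrest, hmidH, htail⟩ := pvSplitList rest
    subst hrest
    rcases htail with rfl | ⟨h2, t2, rfl, hh2⟩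
    · -- exactly one header: ls = pre ++ h0 :: mid
      simp only [List.append_nil]
      rw [pvEnumH_split pre h0 mid 0 hpreH hh,
          pvEnumH_nil mid (0 + (pre.length : Int) + 1) hmidH]
      simp only [List.map_cons, List.map_nil, List.length_cons, List.length_nil,
        List.isEmpty_cons, zero_add, List.getD, List.getElem?_cons_zero, Option.getD_some,
        show ¬ (2 ≤ 0 + 1) by omega, if_false, Bool.false_eq_true]
      rw [PySem.List.slice_to_natCast, List.take_length]
      rw [pvGoA_split pre h0 mid hpreH hh, pvGoA_true mid,
          pvTakeAll (fun l => !pvH l) mid (fun x hx => by simp [hmidH x hx]),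
          pvBody_skip pre h0 mid]
    · -- at least two headers: ls = pre ++ h0 :: (mid ++ h2 :: t2)
      rw [pvEnumH_split pre h0 (mid ++ h2 :: t2) 0 hpreH hh,
          pvEnumH_split mid h2 t2 (0 + (pre.length : Int) + 1) hmidH hh2]
      simp only [List.map_cons, List.length_cons, zero_add, List.getD,
        List.getElem?_cons_succ, List.getElem?_cons_zero, Option.getD_some,
        List.isEmpty_cons, Bool.false_eq_true, if_false,
        show 2 ≤ ((((PySem.List.enumerate t2 ((pre.length : Int) + 1 + (mid.length : Int) + 1)).filter
          (fun p => PySem.Str.startswith p.2 ">")).map (fun p => p.1)).length + 1) + 1 by omega, if_true]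
      rw [show (pre.length : Int) + 1 + (mid.length : Int)
            = ((pre.length + 1 + mid.length : Nat) : Int) by push_cast; ring]
      rw [PySem.List.slice_to_natCast]
      rw [show (pre ++ h0 :: (mid ++ h2 :: t2)).take (pre.length + 1 + mid.length)
            = pre ++ h0 :: mid by
          rw [show pre.length + 1 + mid.length = pre.length + (mid.length + 1) by omega]
          rw [pvTakeApp pre (h0 :: (mid ++ h2 :: t2)) (mid.length + 1)]
          rw [List.take_succ_cons]
          rw [show (mid ++ h2 :: t2).take mid.length = mid from List.take_left ..]]
      rw [pvGoA_split pre h0 (mid ++ h2 :: t2) hpreH hh, pvGoA_true,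
          pvTakeMid (fun l => !pvH l) mid h2 t2
            (fun x hx => by simp [hmidH x hx]) (by simp [hh2]),
          pvBody_skip pre h0 mid]

-- ===== VERDICT (by name: the statement is the Claim_ definition above) =====
theorem parse_fasta_to_cds_spec : Claim_equal_parse_fasta_to_cds := by
  intro s _ _
  unfold Spec_parse_fasta_to_cds parse_fasta_to_cds parse_fasta_to_cds_alt
  rw [pvMain]
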